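-- pv_equiv track=rewrite | github.com/SurpriseDog/KeyLocker | bitfun.py | unpack_ciphermode
-- ===== SOURCE A (Python) =====
-- CRYPTO_LIST = "aes blowfish twofish serpent des rc4 rsa cbc cfb ctr gcm ecb ocb ofb ccm xts md4 md5 crc32 sha1 sha256 sha384 sha512 plain plain64 plain64be essiv bennbi null lmk tcw random".split()		# pylint: disable=C0301
--
-- def unpack_ciphermode(data):
-- 	output = ''
-- 	count = 0
-- 	for c in data:
-- 		count += 1
-- 		if c == 0:
-- 			break
-- 		elif c >= 127:
-- 			# Look up in dictionary
-- 			output += CRYPTO_LIST[c - 127]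
-- 		else:
-- 			output += chr(c)
-- 	return output, count
-- ===== SOURCE B (Python) =====
-- CRYPTO_LIST = "aes blowfish twofish serpent des rc4 rsa cbc cfb ctr gcm ecb ocb ofb ccm xts md4 md5 crc32 sha1 sha256 sha384 sha512 plain plain64 plain64be essiv bennbi null lmk tcw random".split()
--
-- def _decode(c):
-- 	return CRYPTO_LIST[c - 127] if c >= 127 else chr(c)
--
-- def unpack_ciphermode(data):
-- 	# stage 1: scan for the terminator position
-- 	i = 0
-- 	while i < len(data) and data[i] != 0:
-- 		i += 1
-- 	count = i + 1 if i < len(data) else i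
-- 	# stage 2: decode everything before the terminator in one join
-- 	return ''.join(map(_decode, data[:i])), count
-- ===== Notes on version B (the rewrite author's own statement) =====
-- stated objective: alternative
-- what changed: Replaces A's single interleaved accumulate-and-break loop (string += per element, counting as it goes) by two staged passes: a plain index scan that locates the 0 terminator and fixes count, then a separate join-over-map decoding pass on the slice before it.
import Mathlib
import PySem

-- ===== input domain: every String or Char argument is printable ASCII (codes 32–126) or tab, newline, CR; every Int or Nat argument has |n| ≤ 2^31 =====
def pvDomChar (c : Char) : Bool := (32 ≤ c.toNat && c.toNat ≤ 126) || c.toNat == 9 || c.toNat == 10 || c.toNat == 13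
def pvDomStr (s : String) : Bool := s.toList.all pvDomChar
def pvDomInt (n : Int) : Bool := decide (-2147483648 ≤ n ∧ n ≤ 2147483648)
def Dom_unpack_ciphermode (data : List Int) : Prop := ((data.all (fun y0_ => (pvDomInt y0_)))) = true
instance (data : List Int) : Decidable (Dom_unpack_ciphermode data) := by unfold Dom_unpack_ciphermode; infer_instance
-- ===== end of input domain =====

-- B replaces A's single interleaved accumulate-and-break loop by two staged passes:
-- an index scan locating the 0 terminator (fixing count), then a join-over-map decode of the slice before it.

-- ===== PORT A =====
-- CRYPTO_LIST as A's loop consumes it: each entry a list of characters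
def pvCrypto : List (List Char) := [['a', 'e', 's'],
  ['b', 'l', 'o', 'w', 'f', 'i', 's', 'h'],
  ['t', 'w', 'o', 'f', 'i', 's', 'h'],
  ['s', 'e', 'r', 'p', 'e', 'n', 't'],
  ['d', 'e', 's'],
  ['r', 'c', '4'],
  ['r', 's', 'a'],
  ['c', 'b', 'c'],
  ['c', 'f', 'b'],
  ['c', 't', 'r'],
  ['g', 'c', 'm'],
  ['e', 'c', 'b'],
  ['o', 'c', 'b'],
  ['o', 'f', 'b'],
  ['c', 'c', 'm'],
  ['x', 't', 's'],
  ['m', 'd', '4'],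
  ['m', 'd', '5'],
  ['c', 'r', 'c', '3', '2'],
  ['s', 'h', 'a', '1'],
  ['s', 'h', 'a', '2', '5', '6'],
  ['s', 'h', 'a', '3', '8', '4'],
  ['s', 'h', 'a', '5', '1', '2'],
  ['p', 'l', 'a', 'i', 'n'],
  ['p', 'l', 'a', 'i', 'n', '6', '4'],
  ['p', 'l', 'a', 'i', 'n', '6', '4', 'b', 'e'],
  ['e', 's', 's', 'i', 'v'],
  ['b', 'e', 'n', 'n', 'b', 'i'],
  ['n', 'u', 'l', 'l'],
  ['l', 'm', 'k'],
  ['t', 'c', 'w'],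
  ['r', 'a', 'n', 'd', 'o', 'm']]

-- A's for-loop: early break on 0, else append a decoded piece to the growing output
def unpackLoopA : List Int → List Char → Int → List Char × Int
  | [], output, count => (output, count)
  | c :: rest, output, count =>
    let count := count + 1
    if c = 0 then (output, count)
    else if 127 ≤ c then
      -- CRYPTO_LIST[c - 127]; pyGet? is none exactly where Python raises IndexError (outside Pre_)
      unpackLoopA rest (output ++ ((PySem.List.pyGet? pvCrypto (c - 127)).getD [])) count
    else
      -- chr(c); valid for 1 ≤ c ≤ 126 (Python raises ValueError for c < 0, outside Pre_)
      unpackLoopA rest (output ++ [Char.ofNat c.toNat]) count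

def unpack_ciphermode (data : List Int) : String × Int :=
  let r := unpackLoopA data [] 0
  (String.ofList r.1, r.2)

-- ===== PORT B =====
-- B keeps CRYPTO_LIST as Python does: the split() of one space-separated string
def pvCryptoB : List String := PySem.Str.split₀ "aes blowfish twofish serpent des rc4 rsa cbc cfb ctr gcm ecb ocb ofb ccm xts md4 md5 crc32 sha1 sha256 sha384 sha512 plain plain64 plain64be essiv bennbi null lmk tcw random"

-- _decode(c)
def pvDecodeB (c : Int) : String :=
  if 127 ≤ c then (PySem.List.pyGet? pvCryptoB (c - 127)).getD ""
  else String.ofList [Char.ofNat c.toNat]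

-- stage 1: 'while i < len(data) and data[i] != 0: i += 1'
def pvScanB : List Int → Nat
  | [] => 0
  | c :: rest => if c = 0 then 0 else pvScanB rest + 1

def unpack_ciphermode_alt (data : List Int) : String × Int :=
  let i := pvScanB data
  let count : Int := if i < data.length then (i : Int) + 1 else (i : Int)
  -- ''.join(map(_decode, data[:i]))
  (PySem.Str.join "" ((PySem.List.slice data none (some (i : Int))).map pvDecodeB), count)

-- ===== PRECONDITION & SPEC =====
-- Pre_ excludes exactly the inputs where Python A raises: an element strictly before the
-- first 0 that is negative (chr → ValueError) or ≥ 159 = 127 + len(CRYPTO_LIST) (IndexError).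
def Pre_unpack_ciphermode (data : List Int) : Prop :=
  ∀ c ∈ data.takeWhile (fun c => c != 0), 1 ≤ c ∧ c ≤ 158
instance (data : List Int) : Decidable (Pre_unpack_ciphermode data) := by unfold Pre_unpack_ciphermode; infer_instance

def pvWitness_unpack_ciphermode : List Int := [97, 127, 0, 999]

def Spec_unpack_ciphermode (data : List Int) (out : String × Int) : Prop := out = unpack_ciphermode_alt data
instance (data : List Int) (out : String × Int) : Decidable (Spec_unpack_ciphermode data out) := by unfold Spec_unpack_ciphermode; infer_instance

-- ===== CLAIM (what is proved, stated in full; the proofs are below) =====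
def Claim_equal_unpack_ciphermode : Prop := ∀ (data : List Int), Dom_unpack_ciphermode data → Pre_unpack_ciphermode data → Spec_unpack_ciphermode data (unpack_ciphermode data)

-- ===== LEMMAS AND PROOFS =====

-- the List Char decoding of one non-terminator byte, as A's loop produces it
def pvDecA (c : Int) : List Char :=
  if 127 ≤ c then ((PySem.List.pyGet? pvCrypto (c - 127)).getD []) else [Char.ofNat c.toNat]

set_option maxRecDepth 8192 in
lemma pvCrypto_eq : pvCrypto = pvCryptoB.map String.toList := by decide

lemma pyGet?_map_toList (xs : List String) (i : Int) :
    PySem.List.pyGet? (xs.map String.toList) i = (PySem.List.pyGet? xs i).map String.toList := by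
  simp [PySem.List.pyGet?, PySem.List.pyIdx?]

lemma pvDecA_toList (c : Int) : pvDecA c = (pvDecodeB c).toList := by
  unfold pvDecA pvDecodeB
  split_ifs with h
  · rw [pvCrypto_eq, pyGet?_map_toList]
    cases PySem.List.pyGet? pvCryptoB (c - 127) <;> simp
  · simp

lemma pvScanB_eq (data : List Int) :
    pvScanB data = (data.takeWhile (fun c => c != 0)).length := by
  induction data with
  | nil => rfl
  | cons c rest ih =>
    by_cases hc : c = 0
    · subst hc; simp [pvScanB]
    · simp [pvScanB, hc, ih]

lemma take_scanB (data : List Int) :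
    data.take (pvScanB data) = data.takeWhile (fun c => c != 0) := by
  induction data with
  | nil => rfl
  | cons c rest ih =>
    by_cases hc : c = 0
    · subst hc; simp [pvScanB]
    · simp [pvScanB, hc, ih]

lemma unpackLoopA_eq (data : List Int) : ∀ (out : List Char) (count : Int),
    unpackLoopA data out count =
      (out ++ (data.takeWhile (fun c => c != 0)).flatMap pvDecA,
       count + ((data.takeWhile (fun c => c != 0)).length : Int) +
         (if (data.takeWhile (fun c => c != 0)).length < data.length then 1 else 0)) := by
  induction data with
  | nil => intro out count; simp [unpackLoopA]
  | cons c rest ih =>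
    intro out count
    by_cases hc : c = 0
    · subst hc; simp [unpackLoopA]
    · have htw : (c :: rest).takeWhile (fun c => c != 0)
          = c :: rest.takeWhile (fun c => c != 0) := by
        simp [hc]
      have hstep : unpackLoopA (c :: rest) out count
          = unpackLoopA rest (out ++ pvDecA c) (count + 1) := by
        simp only [unpackLoopA, if_neg hc, pvDecA]
        split_ifs <;> rfl
      rw [hstep, ih, htw]
      simp only [List.flatMap_cons, List.length_cons, List.append_assoc, Prod.mk.injEq]
      refine ⟨trivial, ?_⟩
      by_cases hlt : (rest.takeWhile (fun c => c != 0)).length < rest.length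
      · rw [if_pos hlt, if_pos (by omega)]; push_cast; ring
      · rw [if_neg hlt, if_neg (by omega)]; push_cast; ring

lemma join_map_eq (pre : List Int) :
    PySem.Str.join "" (pre.map pvDecodeB) = String.ofList (pre.flatMap pvDecA) := by
  have hjoin : ∀ parts : List (List Char), PySem.Chars.join [] parts = parts.flatten := by
    intro parts
    simp [PySem.Chars.join, List.intercalate]
    induction parts with
    | nil => rfl
    | cons p ps ih => cases ps <;> simp_all [List.intersperse]
  apply String.toList_injective
  rw [PySem.Str.toList_join]
  simp only [String.toList_ofList]
  rw [show ("" : String).toList = [] from rfl, hjoin, List.map_map]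
  rw [List.flatMap]
  congr 1
  exact (List.map_congr_left fun c _ => (pvDecA_toList c).symm)

-- ===== VERDICT (by name: the statement is the Claim_ definition above) =====
theorem unpack_ciphermode_spec : Claim_equal_unpack_ciphermode := by
  intro data _ _
  unfold Spec_unpack_ciphermode unpack_ciphermode unpack_ciphermode_alt
  rw [unpackLoopA_eq data [] 0]
  simp only [PySem.List.slice_to_natCast, take_scanB, Prod.mk.injEq]
  refine ⟨(join_map_eq _).symm, ?_⟩
  rw [pvScanB_eq]
  split_ifs <;> simp
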